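-- pv_equiv track=rewrite | github.com/bssrdf/pyleet | MonotonicQueue.py | rightFurthestGreaterOrEqual
-- ===== SOURCE A (Python) =====
-- import bisect
--
-- def rightFurthestGreaterOrEqual(nums):
--     A, n = nums, len(nums)
--     indx = [-1]*n
--     stack, stackv = [], []
--     for i in range(n-1, -1, -1):
--         if not stack or nums[stack[-1]] < nums[i]:
--             stack.append(i)
--             stackv.append(nums[i])
--         else:
--             idx = bisect.bisect_left(stackv, nums[i])
--             indx[i] = stack[idx]
--     return indx
-- ===== SOURCE B (Python) =====
-- def rightFurthestGreaterOrEqual(nums):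
--     n = len(nums)
--     indx = [-1] * n
--     for i in range(n):
--         for j in range(n - 1, i, -1):
--             if nums[j] >= nums[i]:
--                 indx[i] = j
--                 break
--     return indx
-- ===== Notes on version B (the rewrite author's own statement) =====
-- stated objective: simpler
-- what changed: Replaced the monotonic stack + bisect machinery with a direct per-element right-to-left scan that stops at the first (i.e. furthest) index j > i with nums[j] >= nums[i].
import Mathlib
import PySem

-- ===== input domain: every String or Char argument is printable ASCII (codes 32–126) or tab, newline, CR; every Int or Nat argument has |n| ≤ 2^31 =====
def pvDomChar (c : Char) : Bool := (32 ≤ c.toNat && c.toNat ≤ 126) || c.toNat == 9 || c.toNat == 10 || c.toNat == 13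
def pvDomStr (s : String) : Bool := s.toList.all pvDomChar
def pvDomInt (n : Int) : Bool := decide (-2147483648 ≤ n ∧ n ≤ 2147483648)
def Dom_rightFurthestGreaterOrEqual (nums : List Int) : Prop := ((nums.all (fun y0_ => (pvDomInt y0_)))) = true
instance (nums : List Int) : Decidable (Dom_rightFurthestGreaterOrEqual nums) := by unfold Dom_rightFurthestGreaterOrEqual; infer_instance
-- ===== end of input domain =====

-- B replaces the monotonic-stack + bisect machinery by the direct per-element
-- right-to-left scan for the furthest index with a value ≥ the element: simpler, not faster.

-- ===== PORT A =====
-- bisect.bisect_left ported by its value on ascending sorted lists (the only way A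
-- invokes it: stackv is maintained sorted ascending): insertion point = number of
-- leading elements < x; exact there.
def pvBisectLeft (a : List Int) (x : Int) : Nat :=
  (a.takeWhile (fun y => y < x)).length

-- one iteration of A's loop body; state = (indx, stack, stackv)
def pvStepA (nums : List Int) (st : List Int × List Nat × List Int) (i : Nat) :
    List Int × List Nat × List Int :=
  let (indx, stack, stackv) := st
  match stack.getLast? with
  | none => (indx, stack ++ [i], stackv ++ [nums.getD i 0])
  | some t =>
    if nums.getD t 0 < nums.getD i 0 then
      (indx, stack ++ [i], stackv ++ [nums.getD i 0])
    else
      let idx := pvBisectLeft stackv (nums.getD i 0)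
      (indx.set i ((stack.getD idx 0 : Nat) : Int), stack, stackv)

def rightFurthestGreaterOrEqual (nums : List Int) : List Int :=
  -- for i in range(n-1, -1, -1): … ; indices are always in range, so nums[i] = nums.getD i 0
  ((List.range nums.length).reverse.foldl (pvStepA nums)
    (List.replicate nums.length (-1), ([] : List Nat), ([] : List Int))).1

-- ===== PORT B =====
-- inner loop `for j in range(n-1, i, -1): … break` of Source B
def pvFindRight (nums : List Int) (i : Nat) (j : Nat) : Int :=
  if j ≤ i then -1
  else if nums.getD i 0 ≤ nums.getD j 0 then (j : Int)
  else pvFindRight nums i (j - 1)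
termination_by j
decreasing_by omega

def rightFurthestGreaterOrEqual_alt (nums : List Int) : List Int :=
  (List.range nums.length).map (fun i => pvFindRight nums i (nums.length - 1))

-- ===== PRECONDITION & SPEC =====
def Spec_rightFurthestGreaterOrEqual (nums : List Int) (out : List Int) : Prop := out = rightFurthestGreaterOrEqual_alt nums
instance (nums : List Int) (out : List Int) : Decidable (Spec_rightFurthestGreaterOrEqual nums out) := by unfold Spec_rightFurthestGreaterOrEqual; infer_instance

-- ===== CLAIM (what is proved, stated in full; the proofs are below) =====
def Claim_equal_rightFurthestGreaterOrEqual : Prop := ∀ (nums : List Int), Dom_rightFurthestGreaterOrEqual nums → Spec_rightFurthestGreaterOrEqual nums (rightFurthestGreaterOrEqual nums)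

-- ===== LEMMAS AND PROOFS =====

-- value at index j (indices used below are always < nums.length)
def pvV (nums : List Int) (j : Nat) : Int := nums.getD j 0

lemma pvFindRight_neg (nums : List Int) (i : Nat) :
    ∀ j, (∀ t, i < t → t ≤ j → pvV nums t < pvV nums i) → pvFindRight nums i j = -1 := by
  intro j
  induction j using Nat.strong_induction_on with
  | _ j ih =>
    intro h
    unfold pvFindRight
    split
    · rfl
    · rename_i hji
      rw [if_neg, ih (j - 1) (by omega)]
      · intro t ht htj; exact h t ht (by omega)
      · have := h j (by omega) le_rfl
        simp only [pvV] at this; omega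

lemma pvFindRight_ge (nums : List Int) (i t : Nat) (hit : i < t) (hv : pvV nums i ≤ pvV nums t) :
    ∀ j, t ≤ j → (t : Int) ≤ pvFindRight nums i j := by
  intro j
  induction j using Nat.strong_induction_on with
  | _ j ih =>
    intro htj
    unfold pvFindRight
    split
    · omega
    · split
      · exact_mod_cast htj
      · rename_i hji hvj
        have htj' : t ≤ j - 1 := by
          rcases Nat.lt_or_ge t j with h | h
          · omega
          · have : t = j := by omega
            subst this; simp only [pvV] at hv; omega
        exact ih (j - 1) (by omega) htj'

lemma pvFindRight_cases (nums : List Int) (i : Nat) :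
    ∀ j, pvFindRight nums i j = -1 ∨
      ∃ r : Nat, pvFindRight nums i j = (r : Int) ∧ i < r ∧ r ≤ j ∧
        pvV nums i ≤ pvV nums r ∧ ∀ s, r < s → s ≤ j → pvV nums s < pvV nums i := by
  intro j
  induction j using Nat.strong_induction_on with
  | _ j ih =>
    unfold pvFindRight
    split
    · left; rfl
    · rename_i hji
      split
      · rename_i hv
        right
        exact ⟨j, rfl, by omega, le_rfl, hv, fun s hs hs' => by omega⟩
      · rename_i hv
        rcases ih (j - 1) (by omega) with h | ⟨r, hr, hir, hrj, hvr, hmax⟩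
        · left; exact h
        · right
          refine ⟨r, hr, hir, by omega, hvr, fun s hs hs' => ?_⟩
          rcases Nat.lt_or_ge s j with h' | h'
          · exact hmax s hs (by omega)
          · have : s = j := by omega
            subst this; simp only [pvV]; omega

-- elements strictly before the takeWhile boundary satisfy the predicate
lemma takeWhile_get_sat {α : Type} (p : α → Bool) (l : List α) (q : Nat)
    (hq : q < (l.takeWhile p).length) (hql : q < l.length) : p (l[q]) = true := by
  induction l generalizing q with
  | nil => simp at hql
  | cons a l ihl =>
    by_cases ha : p a
    · cases q with
      | zero => simpa using ha
      | succ q =>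
        simp only [List.takeWhile_cons, ha, if_true] at hq
        simp only [List.length_cons] at hq hql
        simpa using ihl q (by simpa using hq) (by omega)
    · simp [ha] at hq

-- the element at the takeWhile boundary fails the predicate
lemma takeWhile_boundary {α : Type} (p : α → Bool) (l : List α)
    (h : (l.takeWhile p).length < l.length) :
    p (l[(l.takeWhile p).length]'h) = false := by
  induction l with
  | nil => simp at h
  | cons a l ihl =>
    by_cases ha : p a
    · simp only [List.takeWhile_cons, ha, if_true, List.length_cons] at h ⊢
      simpa using ihl (by simpa using h)
    · simp only [List.takeWhile_cons, ha, if_false, Bool.false_eq_true, List.length_nil,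
        List.getElem_cons_zero]

-- key lemma for the else branch: the bisect lookup equals B's downward scan
lemma else_key (nums : List Int) (i : Nat) (stack : List Nat) (_hin : i < nums.length)
    (hp : List.Pairwise (fun a b => b < a ∧ pvV nums a < pvV nums b) stack)
    (hb : ∀ j ∈ stack, i + 1 ≤ j ∧ j < nums.length)
    (hc : ∀ j, i + 1 ≤ j → j < nums.length →
      (∀ k, j < k → k < nums.length → pvV nums k < pvV nums j) → j ∈ stack)
    (L : Nat) (hL : stack.getLast? = some L) (hLv : pvV nums i ≤ pvV nums L) :
    ((stack.getD (pvBisectLeft (stack.map (pvV nums)) (nums.getD i 0)) 0 : Nat) : Int)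
      = pvFindRight nums i (nums.length - 1) := by
  have hLmem : L ∈ stack := List.mem_of_getLast? hL
  set w : List Int := stack.map (pvV nums) with hw
  set q : Int → Bool := fun y => decide (y < pvV nums i) with hq
  have hbis : pvBisectLeft (stack.map (pvV nums)) (nums.getD i 0) = (w.takeWhile q).length := rfl
  set idx : Nat := (w.takeWhile q).length with hidxdef
  have hwlen : w.length = stack.length := List.length_map ..
  have hidx : idx < stack.length := by
    by_contra hge
    have hle : (w.takeWhile q).length ≤ w.length := (List.takeWhile_sublist q).length_le
    have heq : w.takeWhile q = w := (List.takeWhile_prefix q).eq_of_length (by omega)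
    have hLw : pvV nums L ∈ w := List.mem_map_of_mem hLmem
    have := List.mem_takeWhile_imp (p := q) (l := w) (heq ▸ hLw)
    simp only [hq, decide_eq_true_eq] at this
    omega
  have hgetD : stack.getD idx 0 = stack[idx] := List.getD_eq_getElem stack 0 hidx
  have hkv : pvV nums i ≤ pvV nums stack[idx] := by
    have hb2 := takeWhile_boundary q w (by omega)
    rw [List.getElem_map] at hb2
    simp only [hq, decide_eq_false_iff_not, not_lt] at hb2
    exact hb2
  obtain ⟨hk1, hk2⟩ := hb stack[idx] (List.getElem_mem hidx)
  have hge := pvFindRight_ge nums i stack[idx] (by omega) hkv (nums.length - 1) (by omega)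
  rcases pvFindRight_cases nums i (nums.length - 1) with hneg | ⟨jr, hjr, hijr, hjrn, hvjr, hmax⟩
  · rw [hneg] at hge; omega
  · have hkjr : stack[idx] ≤ jr := by rw [hjr] at hge; exact_mod_cast hge
    have hjrstack : jr ∈ stack :=
      hc jr (by omega) (by omega)
        (fun s hs hs' => lt_of_lt_of_le (hmax s hs (by omega)) hvjr)
    obtain ⟨p, hplt, hpeq⟩ := List.getElem_of_mem hjrstack
    have hpidx : ¬ p < idx := by
      intro hlt
      have hsat := takeWhile_get_sat q w p hlt (by omega)
      rw [List.getElem_map] at hsat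
      simp only [hq, decide_eq_true_eq, hpeq] at hsat
      omega
    have hpe : p = idx := by
      by_contra hne
      have hlt : idx < p := by omega
      have := (List.pairwise_iff_getElem.mp hp) idx p hidx hplt hlt
      omega
    rw [hjr, hbis, hgetD]
    subst hpe
    exact_mod_cast hpeq

lemma map_range_set (n i : Nat) (x : Int) (f : Nat → Int) :
    ((List.range n).map f).set i x
      = (List.range n).map (fun j => if j = i then x else f j) := by
  apply List.ext_getElem
  · simp
  · intro j hj1 hj2
    simp only [List.length_set, List.length_map, List.length_range] at hj1
    rw [List.getElem_set]
    simp only [List.getElem_map, List.getElem_range]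
    rcases eq_or_ne i j with h | h
    · simp [h]
    · simp [h, Ne.symm h]

-- the main loop invariant, by induction on the number of processed suffix elements
lemma loopA_inv (nums : List Int) (t : Nat) (ht : t ≤ nums.length) :
    ∃ stack : List Nat,
      (List.range' (nums.length - t) t).reverse.foldl (pvStepA nums)
        (List.replicate nums.length (-1), ([] : List Nat), ([] : List Int))
      = ((List.range nums.length).map
            (fun i => if nums.length - t ≤ i then pvFindRight nums i (nums.length - 1) else -1),
         stack, stack.map (pvV nums))
      ∧ List.Pairwise (fun a b => b < a ∧ pvV nums a < pvV nums b) stack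
      ∧ (∀ j ∈ stack, nums.length - t ≤ j ∧ j < nums.length)
      ∧ (∀ j, nums.length - t ≤ j → j < nums.length →
          (∀ k, j < k → k < nums.length → pvV nums k < pvV nums j) → j ∈ stack)
      ∧ (nums.length - t < nums.length →
          ∃ L, stack.getLast? = some L ∧
            ∀ k, nums.length - t ≤ k → k < nums.length → pvV nums k ≤ pvV nums L) := by
  revert ht
  induction t with
  | zero =>
    intro ht
    refine ⟨[], ?_, List.Pairwise.nil, by simp, by intro j h1 h2 h3; omega, by intro h; omega⟩
    simp only [List.range'_zero, List.reverse_nil, List.foldl_nil]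
    have hmap : (List.range nums.length).map
        (fun i => if nums.length - 0 ≤ i then pvFindRight nums i (nums.length - 1) else -1)
        = List.replicate nums.length (-1) := by
      apply List.ext_getElem
      · simp
      · intro j hj1 hj2
        simp only [List.length_map, List.length_range] at hj1
        simp only [List.getElem_map, List.getElem_range, List.getElem_replicate]
        rw [if_neg (by omega)]
    rw [hmap]
    simp
  | succ t iht =>
    intro ht
    obtain ⟨stack, hfold, hp, hb, hc, hlast⟩ := iht (by omega)
    have hi : nums.length - (t + 1) < nums.length := by omega
    have hm : nums.length - t = nums.length - (t + 1) + 1 := by omega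
    rw [List.range'_succ, List.reverse_cons, List.foldl_append, ← hm, hfold]
    simp only [List.foldl_cons, List.foldl_nil]
    set i : Nat := nums.length - (t + 1) with hidef
    simp only [pvStepA]
    rcases hstack : stack.getLast? with _ | L
    · -- stack is empty: only possible when t = 0 (the very first iteration)
      have hstacknil : stack = [] := List.getLast?_eq_none_iff.mp hstack
      have hnt : ¬ (nums.length - t < nums.length) := by
        intro h
        obtain ⟨L, hL, -⟩ := hlast h
        rw [hstacknil] at hL
        simp at hL
      have ht0 : t = 0 := by omega
      have hieq : i = nums.length - 1 := by omega
      have hneg : pvFindRight nums i (nums.length - 1) = -1 := by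
        rw [hieq]
        unfold pvFindRight
        simp
      subst hstacknil
      refine ⟨[i], ?_, by simp, ?_, ?_, ?_⟩
      · simp only [Prod.mk.injEq, List.nil_append]
        refine ⟨?_, trivial, by simp [pvV]⟩
        apply List.map_congr_left
        intro j hj
        rw [List.mem_range] at hj
        rcases eq_or_ne j i with h | h
        · subst h
          rw [if_neg (by omega), if_pos (by omega), hneg]
        · have : ¬ (nums.length - (t + 1) ≤ j) := by omega
          rw [if_neg (by omega), if_neg this]
      · intro j hj
        simp only [List.mem_singleton] at hj
        omega
      · intro j h1 h2 h3
        simp only [List.mem_singleton]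
        omega
      · intro h
        refine ⟨i, by simp, fun k hk1 hk2 => ?_⟩
        have : k = i := by omega
        rw [this]
    · -- stack nonempty, top value L
      dsimp only
      have hnonnil : stack ≠ [] := by
        intro h
        rw [h] at hstack
        simp at hstack
      have hne : nums.length - t < nums.length := by
        obtain ⟨j, hj⟩ := List.exists_mem_of_ne_nil stack hnonnil
        have := hb j hj
        omega
      obtain ⟨L', hL', hLmax⟩ := hlast hne
      have hLL : L' = L := by
        rw [hL'] at hstack
        exact Option.some.inj hstack
      rw [hLL] at hL' hLmax
      have hLbounds := hb L (List.mem_of_getLast? hL')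
      by_cases hvli : nums.getD L 0 < nums.getD i 0
      · -- append branch: nums[i] is a new strict suffix maximum
        rw [if_pos hvli]
        have hneg : pvFindRight nums i (nums.length - 1) = -1 := by
          apply pvFindRight_neg
          intro s hs1 hs2
          have := hLmax s (by omega) (by omega)
          simp only [pvV] at this ⊢
          omega
        refine ⟨stack ++ [i], ?_, ?_, ?_, ?_, ?_⟩
        · simp only [Prod.mk.injEq, List.map_append, List.map_cons, List.map_nil, pvV,
            and_true]
          apply List.map_congr_left
          intro j hj
          rw [List.mem_range] at hj
          rcases eq_or_ne j i with h | h
          · subst h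
            rw [if_neg (by omega), if_pos (by omega), hneg]
          · have h1 : (nums.length - t ≤ j) ↔ (nums.length - (t + 1) ≤ j) := by omega
            by_cases h2 : nums.length - t ≤ j
            · rw [if_pos h2, if_pos (h1.mp h2)]
            · rw [if_neg h2, if_neg (fun hh => h2 (h1.mpr hh))]
        · rw [List.pairwise_append]
          refine ⟨hp, by simp, ?_⟩
          intro a ha b hbmem
          simp only [List.mem_singleton] at hbmem
          subst hbmem
          have haB := hb a ha
          have hav := hLmax a (by omega) (by omega)
          refine ⟨by omega, ?_⟩
          simp only [pvV] at hav ⊢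
          omega
        · intro j hj
          rcases List.mem_append.mp hj with h | h
          · have := hb j h; omega
          · simp only [List.mem_singleton] at h; omega
        · intro j h1 h2 h3
          rcases eq_or_ne j i with h | h
          · subst h
            exact List.mem_append.mpr (Or.inr (by simp))
          · exact List.mem_append.mpr (Or.inl (hc j (by omega) h2 h3))
        · intro _
          refine ⟨i, List.getLast?_concat, fun k hk1 hk2 => ?_⟩
          rcases eq_or_ne k i with h | h
          · rw [h]
          · have := hLmax k (by omega) (by omega)
            simp only [pvV] at this ⊢
            omega
      · -- else branch: look up the answer in the stack
        rw [if_neg hvli]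
        have hLv : pvV nums i ≤ pvV nums L := not_lt.mp hvli
        have hb' : ∀ j ∈ stack, i + 1 ≤ j ∧ j < nums.length := by
          intro j hj; have := hb j hj; omega
        have hc' : ∀ j, i + 1 ≤ j → j < nums.length →
            (∀ k, j < k → k < nums.length → pvV nums k < pvV nums j) → j ∈ stack := by
          intro j h1 h2 h3; exact hc j (by omega) h2 h3
        have hkey := else_key nums i stack hi hp hb' hc' L hL' hLv
        refine ⟨stack, ?_, hp, ?_, ?_, ?_⟩
        · simp only [Prod.mk.injEq, and_true]
          rw [map_range_set]
          apply List.map_congr_left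
          intro j hj
          rw [List.mem_range] at hj
          rcases eq_or_ne j i with h | h
          · subst h
            rw [if_pos rfl, if_pos (by omega)]
            exact hkey
          · rw [if_neg h]
            have h1 : (nums.length - t ≤ j) ↔ (nums.length - (t + 1) ≤ j) := by omega
            by_cases h2 : nums.length - t ≤ j
            · rw [if_pos h2, if_pos (h1.mp h2)]
            · rw [if_neg h2, if_neg (fun hh => h2 (h1.mpr hh))]
        · intro j hj; have := hb j hj; omega
        · intro j h1 h2 h3
          rcases eq_or_ne j i with h | h
          · subst h
            have := h3 L (by omega) (by omega)
            simp only [pvV] at this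
            omega
          · exact hc j (by omega) h2 h3
        · intro _
          refine ⟨L, hL', fun k hk1 hk2 => ?_⟩
          rcases eq_or_ne k i with h | h
          · rw [h]; exact hLv
          · exact hLmax k (by omega) hk2

-- ===== VERDICT (by name: the statement is the Claim_ definition above) =====
theorem rightFurthestGreaterOrEqual_spec : Claim_equal_rightFurthestGreaterOrEqual := by
  intro nums _
  unfold Spec_rightFurthestGreaterOrEqual
  obtain ⟨stack, hfold, -⟩ := loopA_inv nums nums.length le_rfl
  unfold rightFurthestGreaterOrEqual rightFurthestGreaterOrEqual_alt
  have hrange : List.range' (nums.length - nums.length) nums.length = List.range nums.length := by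
    simp [List.range_eq_range']
  rw [hrange] at hfold
  rw [hfold]
  apply List.map_congr_left
  intro i hi
  rw [if_pos (by omega)]
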